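-- pv_equiv track=rewrite | github.com/buytheaway/CATAN-GAME | tools/engine_source_audit.py | _audit_ui
-- ===== SOURCE A (Python) =====
-- RULE_FUNCS = [
--     "best_trade_rate",
--     "trade_with_bank",
--     "distribute_for_roll",
--     "update_longest_road",
--     "update_largest_army",
--     "check_win",
--     "buy_dev",
--     "play_dev",
-- ]
--
-- def _extract_defs(lines: list[str]) -> dict[str, dict]:
--     defs: dict[str, dict] = {}
--     for i, line in enumerate(lines):
--         if line.lstrip().startswith("def "):
--             indent = len(line) - len(line.lstrip())
--             name = line.strip().split()[1].split("(")[0]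
--             body = []
--             for j in range(i + 1, len(lines)):
--                 nxt = lines[j]
--                 if nxt.strip() == "":
--                     body.append(nxt)
--                     continue
--                 cur_indent = len(nxt) - len(nxt.lstrip())
--                 if cur_indent <= indent and nxt.lstrip().startswith("def "):
--                     break
--                 if cur_indent <= indent and nxt.lstrip().startswith("class "):
--                     break
--                 if cur_indent < indent and nxt.strip():
--                     break
--                 body.append(nxt)
--             defs[name] = {"line": i + 1, "body": "\n".join(body)}
--     return defs
--
-- def _audit_ui(lines: list[str]) -> list[str]:
--     issues: list[str] = []
--     defs = _extract_defs(lines)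
--     for name in RULE_FUNCS:
--         if name in defs:
--             body = defs[name]["body"]
--             if "engine_rules" not in body:
--                 issues.append(f"ui_v6.py:{defs[name]['line']}: local rule impl '{name}' without engine_rules")
--     if "engine_rules.apply_cmd" not in "\n".join(lines):
--         issues.append("ui_v6.py: missing engine_rules.apply_cmd usage")
--     return issues
-- ===== SOURCE B (Python) =====
-- RULE_FUNCS = [
--     "best_trade_rate",
--     "trade_with_bank",
--     "distribute_for_roll",
--     "update_longest_road",
--     "update_largest_army",
--     "check_win",
--     "buy_dev",
--     "play_dev",
-- ]
--
-- def _extract_defs_single_pass(lines: list[str]) -> dict[str, dict]: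
--     # One pass over the file maintaining a stack of open def blocks.
--     open_blocks = []  # each: [name, start_line, indent, body_lines]
--     done = []
--     for k, line in enumerate(lines):
--         if line.strip() == "":
--             for b in open_blocks:
--                 b[3].append(line)
--             continue
--         cur = len(line) - len(line.lstrip())
--         head = line.lstrip()
--         is_def = head.startswith("def ")
--         is_class = head.startswith("class ")
--         still = []
--         for b in open_blocks:
--             if cur < b[2] or ((is_def or is_class) and cur <= b[2]):
--                 done.append(b)
--             else:
--                 b[3].append(line)
--                 still.append(b)
--         open_blocks = still
--         if is_def:
--             name = line.strip().split()[1].split("(")[0]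
--             open_blocks.append([name, k + 1, cur, []])
--     done.extend(open_blocks)
--     done.sort(key=lambda b: b[1])
--     return {b[0]: {"line": b[1], "body": "\n".join(b[3])} for b in done}
--
-- def _audit_ui(lines: list[str]) -> list[str]:
--     issues: list[str] = []
--     defs = _extract_defs_single_pass(lines)
--     for name in RULE_FUNCS:
--         if name in defs:
--             body = defs[name]["body"]
--             if "engine_rules" not in body:
--                 issues.append(f"ui_v6.py:{defs[name]['line']}: local rule impl '{name}' without engine_rules")
--     if "engine_rules.apply_cmd" not in "\n".join(lines):
--         issues.append("ui_v6.py: missing engine_rules.apply_cmd usage")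
--     return issues
-- ===== Notes on version B (the rewrite author's own statement) =====
-- stated objective: alternative
-- what changed: Replaced the per-def rescan of the remainder of the file by a single left-to-right pass that keeps a stack of open def blocks, finalizes a block when a line closes it, and builds the defs dict from the finalized blocks sorted by start line.
import Mathlib
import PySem

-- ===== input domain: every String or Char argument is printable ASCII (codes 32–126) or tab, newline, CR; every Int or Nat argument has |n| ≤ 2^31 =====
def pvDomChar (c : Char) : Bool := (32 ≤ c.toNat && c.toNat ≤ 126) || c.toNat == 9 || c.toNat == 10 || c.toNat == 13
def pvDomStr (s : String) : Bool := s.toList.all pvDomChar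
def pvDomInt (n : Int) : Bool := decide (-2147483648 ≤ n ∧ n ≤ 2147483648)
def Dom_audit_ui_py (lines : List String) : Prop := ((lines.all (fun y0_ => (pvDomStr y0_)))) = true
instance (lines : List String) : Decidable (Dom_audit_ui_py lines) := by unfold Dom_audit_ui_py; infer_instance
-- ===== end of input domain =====

-- B replaces A's per-def rescan of the rest of the file by one pass keeping a stack of
-- open def blocks (objective: alternative; same cost in practice; neither mutates input).

-- shared leaf helpers: module-level constant RULE_FUNCS and expressions both Pythons contain verbatim
def pvRuleFuncs : List String :=
  ["best_trade_rate", "trade_with_bank", "distribute_for_roll", "update_longest_road",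
   "update_largest_army", "check_win", "buy_dev", "play_dev"]

-- line.strip() == ""  (a blank line)
def pvBlankLine (l : String) : Bool := PySem.Str.strip l == ""
-- len(line) - len(line.lstrip())
def pvIndent (l : String) : Nat := (PySem.Str.len l - PySem.Str.len (PySem.Str.lstrip l)).toNat
-- line.lstrip().startswith("def ")
def pvIsDef (l : String) : Bool := PySem.Str.startswith (PySem.Str.lstrip l) "def "
-- line.lstrip().startswith("class ")
def pvIsClass (l : String) : Bool := PySem.Str.startswith (PySem.Str.lstrip l) "class "
-- line.strip().split()[1].split("(")[0]  (the [1] is guarded by Pre_; .getD covers the IndexError case)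
def pvDefName (l : String) : String :=
  (((PySem.Str.split? ((PySem.List.pyGet? (PySem.Str.split₀ (PySem.Str.strip l)) 1).getD "") "(").getD []).headD "")
-- f"ui_v6.py:{line}: local rule impl '{name}' without engine_rules"
def pvMsg (line : Int) (name : String) : String :=
  PySem.Str.join "" ["ui_v6.py:", PySem.Int.toStr line, ": local rule impl '", name, "' without engine_rules"]

-- ===== PORT A =====

-- the inner 'for j in range(i + 1, len(lines))' loop of _extract_defs, walking the suffix after the def line
def pvBodyA (indent : Nat) : List String → List String
  | [] => []
  | nxt :: rest =>
    if pvBlankLine nxt then nxt :: pvBodyA indent rest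
    else
      let cur := pvIndent nxt
      if decide (cur ≤ indent) && pvIsDef nxt then []
      else if decide (cur ≤ indent) && pvIsClass nxt then []
      else if decide (cur < indent) && !pvBlankLine nxt then []
      else nxt :: pvBodyA indent rest

-- the outer 'for i, line in enumerate(lines)' loop of _extract_defs (k = current index)
def pvExtractAGo (k : Nat) (ls : List String) (defs : PySem.Dict String (Int × String)) :
    PySem.Dict String (Int × String) :=
  match ls with
  | [] => defs
  | line :: rest =>
    pvExtractAGo (k + 1) rest
      (if pvIsDef line then
        defs.insert (pvDefName line)
          ((k : Int) + 1, PySem.Str.join "\n" (pvBodyA (pvIndent line) rest))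
      else defs)

def audit_ui_py (lines : List String) : List String :=
  let defs := pvExtractAGo 0 lines PySem.Dict.empty
  let issues := pvRuleFuncs.foldl (fun issues name =>
    match defs.get? name with
    | some entry =>
      if PySem.Str.isIn "engine_rules" entry.2 then issues
      else issues ++ [pvMsg entry.1 name]
    | none => issues) []
  if PySem.Str.isIn "engine_rules.apply_cmd" (PySem.Str.join "\n" lines) then issues
  else issues ++ ["ui_v6.py: missing engine_rules.apply_cmd usage"]

-- ===== PORT B =====

-- an open def block: (name, start line, indent, body lines so far)
abbrev pvBlk : Type := String × Int × Nat × List String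

-- close test of one open block against the current non-blank line (cur, is_def or is_class)
def pvCloses (cur : Nat) (isdc : Bool) (d : Nat) : Bool :=
  decide (cur < d) || (isdc && decide (cur ≤ d))

-- b[3].append(line)
def pvAppendBlk (line : String) (b : pvBlk) : pvBlk := (b.1, b.2.1, b.2.2.1, b.2.2.2 ++ [line])

-- one line of the single pass; state = (open_blocks, done)
def pvStepB (st : List pvBlk × List pvBlk) (pr : Int × String) : List pvBlk × List pvBlk :=
  let line := pr.2
  if pvBlankLine line then (st.1.map (pvAppendBlk line), st.2)
  else
    let cur := pvIndent line
    let isdc := pvIsDef line || pvIsClass line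
    let ds := st.1.foldl (fun (p : List pvBlk × List pvBlk) b =>
      if pvCloses cur isdc b.2.2.1 then (p.1 ++ [b], p.2)
      else (p.1, p.2 ++ [pvAppendBlk line b])) (st.2, [])
    let stack2 := if pvIsDef line then ds.2 ++ [(pvDefName line, pr.1 + 1, cur, ([] : List String))]
                  else ds.2
    (stack2, ds.1)

def pvExtractB (lines : List String) : PySem.Dict String (Int × String) :=
  let r := (PySem.List.enumerate lines 0).foldl pvStepB ([], [])
  let fin := PySem.List.sorted (r.2 ++ r.1) (fun b => b.2.1) false
  fin.foldl (fun d b => d.insert b.1 (b.2.1, PySem.Str.join "\n" b.2.2.2)) PySem.Dict.empty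

def audit_ui_py_alt (lines : List String) : List String :=
  let defs := pvExtractB lines
  let issues := pvRuleFuncs.foldl (fun issues name =>
    match defs.get? name with
    | some entry =>
      if PySem.Str.isIn "engine_rules" entry.2 then issues
      else issues ++ [pvMsg entry.1 name]
    | none => issues) []
  if PySem.Str.isIn "engine_rules.apply_cmd" (PySem.Str.join "\n" lines) then issues
  else issues ++ ["ui_v6.py: missing engine_rules.apply_cmd usage"]

-- ===== PRECONDITION & SPEC =====
-- Pre_ excludes exactly the inputs where Python A raises IndexError: a line that starts a def
-- header ("def " after indentation) but has no second whitespace-token to take the name from.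
def Pre_audit_ui_py (lines : List String) : Prop :=
  ∀ l ∈ lines, PySem.Str.startswith (PySem.Str.lstrip l) "def " = true →
    2 ≤ (PySem.Str.split₀ (PySem.Str.strip l)).length
instance (lines : List String) : Decidable (Pre_audit_ui_py lines) := by
  unfold Pre_audit_ui_py; infer_instance

def pvWitness_audit_ui_py : List String :=
  ["def check_win(g):", "    return g.vps >= 10"]

def Spec_audit_ui_py (lines : List String) (out : List String) : Prop := out = audit_ui_py_alt lines
instance (lines : List String) (out : List String) : Decidable (Spec_audit_ui_py lines out) := by
  unfold Spec_audit_ui_py; infer_instance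

-- ===== CLAIM (what is proved, stated in full; the proofs are below) =====
def Claim_equal_audit_ui_py : Prop :=
  ∀ (lines : List String), Dom_audit_ui_py lines → Pre_audit_ui_py lines →
    Spec_audit_ui_py lines (audit_ui_py lines)

-- ===== LEMMAS AND PROOFS =====

-- does the current line close a block of the given indent?
def pvClosesL (d : Nat) (l : String) : Bool := pvCloses (pvIndent l) (pvIsDef l || pvIsClass l) d

-- the line belongs to the body of a still-open block of indent d
def pvP (d : Nat) (l : String) : Bool := pvBlankLine l || !pvClosesL d l

-- the per-header specification: the finalized block of each def header, in header order
def pvSpec (k : Int) : List String → List pvBlk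
  | [] => []
  | l :: rest =>
    if pvIsDef l then
      (pvDefName l, k + 1, pvIndent l, rest.takeWhile (pvP (pvIndent l))) :: pvSpec (k + 1) rest
    else pvSpec (k + 1) rest

def pvIns (d : PySem.Dict String (Int × String)) (b : pvBlk) : PySem.Dict String (Int × String) :=
  d.insert b.1 (b.2.1, PySem.Str.join "\n" b.2.2.2)

def pvFin (rest : List String) (b : pvBlk) : pvBlk :=
  (b.1, b.2.1, b.2.2.1, b.2.2.2 ++ rest.takeWhile (pvP b.2.2.1))

lemma pvBlank_not_def {l : String} (h : pvBlankLine l = true) : pvIsDef l = false := by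
  unfold pvBlankLine at h
  unfold pvIsDef
  by_contra hc
  have h1 : PySem.Str.startswith (PySem.Str.lstrip l) "def " = true := by
    revert hc; cases PySem.Str.startswith (PySem.Str.lstrip l) "def " <;> simp
  have h2 := (PySem.Chars.startswith_iff _ _).mp (by simpa using h1)
  have h0 : PySem.Chars.strip l.toList = [] := by
    have h3 : PySem.Str.strip l = "" := by simpa using h
    simpa using congrArg String.toList h3
  simp only [PySem.Chars.strip, PySem.Chars.rstrip, List.reverse_eq_nil_iff,
    List.dropWhile_eq_nil_iff] at h0
  obtain ⟨t, ht⟩ := h2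
  have hdm : 'd' ∈ PySem.Chars.lstrip l.toList := by rw [← ht]; simp
  have := h0 _ (List.mem_reverse.mpr hdm)
  simp [PySem.Chars.isspace] at this

lemma pvBodyA_eq_takeWhile (d : Nat) (ls : List String) :
    pvBodyA d ls = ls.takeWhile (pvP d) := by
  induction ls with
  | nil => rfl
  | cons nxt rest ih =>
    by_cases hb : pvBlankLine nxt
    · simp [pvBodyA, pvP, hb, ih]
    · simp only [Bool.not_eq_true] at hb
      cases hdef : pvIsDef nxt <;> cases hcls : pvIsClass nxt <;>
        by_cases h1 : pvIndent nxt < d <;> by_cases h2 : pvIndent nxt ≤ d <;>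
          simp [pvBodyA, pvP, pvClosesL, pvCloses, hb, hdef, hcls, h1, h2, ih]

lemma pvExtractAGo_eq (ls : List String) : ∀ (k : Nat) (d0 : PySem.Dict String (Int × String)),
    pvExtractAGo k ls d0 = (pvSpec (k : Int) ls).foldl pvIns d0 := by
  induction ls with
  | nil => intro k d0; rfl
  | cons line rest ih =>
    intro k d0
    simp only [pvExtractAGo, pvSpec]
    cases hdef : pvIsDef line
    · simpa using ih (k + 1) d0
    · rw [pvBodyA_eq_takeWhile]
      have := ih (k + 1) (pvIns d0 (pvDefName line, (k : Int) + 1, pvIndent line,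
        rest.takeWhile (pvP (pvIndent line))))
      simpa [pvIns] using this

lemma pvStepB_fold (line : String) (cur : Nat) (isdc : Bool) (stack : List pvBlk) :
    ∀ (dn st0 : List pvBlk),
    stack.foldl (fun (p : List pvBlk × List pvBlk) b =>
      if pvCloses cur isdc b.2.2.1 then (p.1 ++ [b], p.2)
      else (p.1, p.2 ++ [pvAppendBlk line b])) (dn, st0) =
    (dn ++ stack.filter (fun b => pvCloses cur isdc b.2.2.1),
     st0 ++ (stack.filter (fun b => !pvCloses cur isdc b.2.2.1)).map (pvAppendBlk line)) := by
  induction stack with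
  | nil => intro dn st0; simp
  | cons b bs ih =>
    intro dn st0
    simp only [List.foldl_cons, List.filter_cons]
    cases hc : pvCloses cur isdc b.2.2.1
    · simpa [hc, List.append_assoc] using ih dn (st0 ++ [pvAppendBlk line b])
    · simpa [hc, List.append_assoc] using ih (dn ++ [b]) st0

lemma pvFin_cons_keep {l : String} {b : pvBlk} (h : pvP b.2.2.1 l = true) (ls : List String) :
    pvFin (l :: ls) b = pvFin ls (pvAppendBlk l b) := by
  simp [pvFin, pvAppendBlk, h]

lemma pvFin_cons_close {l : String} {b : pvBlk} (h : pvP b.2.2.1 l = false) (ls : List String) :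
    pvFin (l :: ls) b = b := by
  simp [pvFin, h]

lemma pvFin_nil (b : pvBlk) : pvFin [] b = b := by simp [pvFin]

set_option maxHeartbeats 1000000 in
lemma pvB_invariant (ls : List String) : ∀ (s : Int) (stack done : List pvBlk),
    (((PySem.List.enumerate ls s).foldl pvStepB (stack, done)).2 ++
     ((PySem.List.enumerate ls s).foldl pvStepB (stack, done)).1).Perm
    (done ++ stack.map (pvFin ls) ++ pvSpec s ls) := by
  induction ls with
  | nil =>
    intro s stack done
    simp [PySem.List.enumerate, pvSpec, List.map_congr_left (fun b _ => pvFin_nil b)]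
  | cons l rest ih =>
    intro s stack done
    rw [PySem.List.enumerate_cons, List.foldl_cons]
    by_cases hb : pvBlankLine l = true
    · -- blank line: appended to every open block, not a header
      have hstep : pvStepB (stack, done) (s, l) = (stack.map (pvAppendBlk l), done) := by
        simp [pvStepB, hb]
      rw [hstep]
      have hmap : stack.map (pvFin (l :: rest)) = (stack.map (pvAppendBlk l)).map (pvFin rest) := by
        rw [List.map_map]
        exact List.map_congr_left (fun b _ => pvFin_cons_keep (by simp [pvP, hb]) rest)
      have hspec : pvSpec s (l :: rest) = pvSpec (s + 1) rest := by
        simp [pvSpec, pvBlank_not_def hb]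
      rw [hmap, hspec]
      exact ih (s + 1) (stack.map (pvAppendBlk l)) done
    · -- non-blank line: it closes some open blocks, is appended to the others, may open a block
      have hb' : pvBlankLine l = false := by revert hb; cases pvBlankLine l <;> simp
      have hstep : pvStepB (stack, done) (s, l) =
          ((if pvIsDef l
            then (stack.filter (fun b => !pvCloses (pvIndent l) (pvIsDef l || pvIsClass l) b.2.2.1)).map
                   (pvAppendBlk l) ++ [(pvDefName l, s + 1, pvIndent l, ([] : List String))]
            else (stack.filter (fun b => !pvCloses (pvIndent l) (pvIsDef l || pvIsClass l) b.2.2.1)).map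
                   (pvAppendBlk l)),
           done ++ stack.filter (fun b => pvCloses (pvIndent l) (pvIsDef l || pvIsClass l) b.2.2.1)) := by
        simp only [pvStepB, hb', Bool.false_eq_true, if_false]
        rw [pvStepB_fold]
        simp
      rw [hstep]
      have hkey : (stack.map (pvFin (l :: rest))).Perm
          ((stack.filter (fun b => pvCloses (pvIndent l) (pvIsDef l || pvIsClass l) b.2.2.1)) ++
           ((stack.filter (fun b => !pvCloses (pvIndent l) (pvIsDef l || pvIsClass l) b.2.2.1)).map
              (pvAppendBlk l)).map (pvFin rest)) := by
        have hsplit := (List.filter_append_perm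
          (fun b => pvCloses (pvIndent l) (pvIsDef l || pvIsClass l) b.2.2.1) stack).symm
        refine (hsplit.map (pvFin (l :: rest))).trans ?_
        rw [List.map_append]
        have hC : (stack.filter (fun b => pvCloses (pvIndent l) (pvIsDef l || pvIsClass l) b.2.2.1)).map
            (pvFin (l :: rest)) =
            stack.filter (fun b => pvCloses (pvIndent l) (pvIsDef l || pvIsClass l) b.2.2.1) := by
          refine (List.map_congr_left (fun b hbmem => ?_)).trans (List.map_id _)
          have hcb := List.of_mem_filter hbmem
          exact pvFin_cons_close (by simp [pvP, hb', pvClosesL]; simpa using hcb) rest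
        have hK : (stack.filter (fun b => !pvCloses (pvIndent l) (pvIsDef l || pvIsClass l) b.2.2.1)).map
            (pvFin (l :: rest)) =
            (stack.filter (fun b => !pvCloses (pvIndent l) (pvIsDef l || pvIsClass l) b.2.2.1)).map
              (fun b => pvFin rest (pvAppendBlk l b)) := by
          refine List.map_congr_left (fun b hbmem => ?_)
          have hcb := List.of_mem_filter hbmem
          simp only [Bool.not_eq_true'] at hcb
          exact pvFin_cons_keep (by simp [pvP, hb', pvClosesL]; simpa using hcb) rest
        rw [hC, hK, List.map_map]
        exact List.Perm.refl _
      cases hdef : pvIsDef l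
      · rw [hdef] at hkey
        rw [if_neg (by simp)]
        have hspec : pvSpec s (l :: rest) = pvSpec (s + 1) rest := by simp [pvSpec, hdef]
        rw [hspec]
        refine (ih (s + 1) _ _).trans ?_
        simp only [List.append_assoc]
        refine List.Perm.append_left done ?_
        rw [← List.append_assoc]
        exact hkey.symm.append_right _
      · rw [hdef] at hkey
        rw [if_pos rfl]
        have hspec : pvSpec s (l :: rest) =
            (pvDefName l, s + 1, pvIndent l, rest.takeWhile (pvP (pvIndent l))) :: pvSpec (s + 1) rest := by
          simp [pvSpec, hdef]
        rw [hspec]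
        refine (ih (s + 1) _ _).trans ?_
        have hnew : pvFin rest (pvDefName l, s + 1, pvIndent l, ([] : List String)) =
            (pvDefName l, s + 1, pvIndent l, rest.takeWhile (pvP (pvIndent l))) := by
          simp [pvFin]
        rw [List.map_append]
        simp only [List.map_cons, List.map_nil, hnew]
        simp only [List.append_assoc, List.singleton_append]
        refine List.Perm.append_left done ?_
        rw [← List.append_assoc]
        exact hkey.symm.append_right _

lemma pvSpec_line_ge (ls : List String) : ∀ (s : Int), ∀ b ∈ pvSpec s ls, s + 1 ≤ b.2.1 := by
  induction ls with
  | nil => intro s b hb; simp [pvSpec] at hb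
  | cons l rest ih =>
    intro s b hb
    simp only [pvSpec] at hb
    cases hdef : pvIsDef l
    · rw [hdef] at hb
      simp only [Bool.false_eq_true, if_false] at hb
      have := ih (s + 1) b hb; omega
    · rw [hdef] at hb
      simp at hb
      rcases hb with h | h
      · simp [h]
      · have := ih (s + 1) b h; omega

lemma pvSpec_lines_lt (ls : List String) : ∀ (s : Int),
    (pvSpec s ls).Pairwise (fun a b => a.2.1 < b.2.1) := by
  induction ls with
  | nil => intro s; simp [pvSpec]
  | cons l rest ih =>
    intro s
    simp only [pvSpec]
    cases hdef : pvIsDef l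
    · simpa using ih (s + 1)
    · rw [if_pos rfl, List.pairwise_cons]
      refine ⟨fun b hb => ?_, ih (s + 1)⟩
      have h1 : s + 1 + 1 ≤ b.2.1 := pvSpec_line_ge rest (s + 1) b hb
      show s + 1 < b.2.1
      omega

lemma pvExtractB_eq (lines : List String) :
    pvExtractB lines = pvExtractAGo 0 lines PySem.Dict.empty := by
  unfold pvExtractB
  have hperm := pvB_invariant lines 0 [] []
  simp only [List.map_nil, List.nil_append, List.append_nil] at hperm
  have hsorted := PySem.List.sorted_eq_of_perm_of_pairwise_lt
    (((PySem.List.enumerate lines 0).foldl pvStepB ([], [])).2 ++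
     ((PySem.List.enumerate lines 0).foldl pvStepB ([], [])).1)
    (pvSpec 0 lines) (fun b => b.2.1) hperm.symm (pvSpec_lines_lt lines 0)
  show (PySem.List.sorted
      (((PySem.List.enumerate lines 0).foldl pvStepB ([], [])).2 ++
       ((PySem.List.enumerate lines 0).foldl pvStepB ([], [])).1) (fun b => b.2.1) false).foldl
      (fun d b => d.insert b.1 (b.2.1, PySem.Str.join "\n" b.2.2.2)) PySem.Dict.empty =
    pvExtractAGo 0 lines PySem.Dict.empty
  rw [hsorted, pvExtractAGo_eq lines 0 PySem.Dict.empty]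
  norm_num
  rfl

-- ===== VERDICT (by name: the statement is the Claim_ definition above) =====
theorem audit_ui_py_spec : Claim_equal_audit_ui_py := by
  intro lines _ _
  unfold Spec_audit_ui_py audit_ui_py audit_ui_py_alt
  rw [pvExtractB_eq]
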